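-- pv_equiv track=rewrite | github.com/jiyolla/study-for-coding-test | programmers/2_86052.py | solution
-- ===== SOURCE A (Python) =====
-- def solution(grid):
--     #   0
--     # 3   1
--     #   2
--     visited = [[[False]*4 for _ in range(len(grid[0]))] for _ in range(len(grid))]
--
--     def next_direction(r, c, d):
--         if grid[r][c] == 'S':
--             return d
--         if grid[r][c] == 'L':
--             return (d - 1)%4
--         if grid[r][c] == 'R':
--             return (d + 1)%4
--
--     def dfs(r, c, d):
--         visited[r][c][d] = True
--
--         if d == 0:
--             r -= 1
--             if r < 0:
--                 r = len(grid) - 1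
--         elif d == 1:
--             c += 1
--             if c == len(grid[0]):
--                 c = 0
--         elif d == 2:
--             r += 1
--             if r == len(grid):
--                 r = 0
--         elif d == 3:
--             c -= 1
--             if c < 0:
--                 c = len(grid[0]) - 1
--
--         d = next_direction(r, c, d)
--         if not visited[r][c][d]:
--             return dfs(r, c, d) + 1
--         return 1
--
--
--     ret = []
--     for r in range(len(grid)):
--         for c in range(len(grid[0])):
--             for d in range(4):
--                 if not visited[r][c][d]:
--                     ret.append(dfs(r, c, d))
--
--     return sorted(ret)
-- ===== SOURCE B (Python) =====
-- def solution(grid):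
--     h, w = len(grid), (len(grid[0]) if grid else 0)
--
--     def step(r, c, d):
--         if d == 0:
--             r = (r - 1) % h
--         elif d == 1:
--             c = (c + 1) % w
--         elif d == 2:
--             r = (r + 1) % h
--         else:
--             c = (c - 1) % w
--         ch = grid[r][c]
--         if ch == 'L':
--             d = (d - 1) % 4
--         elif ch == 'R':
--             d = (d + 1) % 4
--         return (r, c, d)
--
--     visited = set()
--     ret = []
--     for r in range(h):
--         for c in range(w):
--             for d in range(4):
--                 if (r, c, d) in visited:
--                     continue
--                 count = 0
--                 cur = (r, c, d)
--                 while True: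
--                     visited.add(cur)
--                     count += 1
--                     nxt = step(*cur)
--                     if nxt in visited:
--                         break
--                     cur = nxt
--                 ret.append(count)
--     return sorted(ret)
-- ===== Notes on version B (the rewrite author's own statement) =====
-- stated objective: alternative
-- what changed: The recursive dfs over a 3D visited array is replaced by an iterative chain-length loop with a count accumulator, a visited set, and a single modulo-based step helper driven over one flattened state list.
import Mathlib
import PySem

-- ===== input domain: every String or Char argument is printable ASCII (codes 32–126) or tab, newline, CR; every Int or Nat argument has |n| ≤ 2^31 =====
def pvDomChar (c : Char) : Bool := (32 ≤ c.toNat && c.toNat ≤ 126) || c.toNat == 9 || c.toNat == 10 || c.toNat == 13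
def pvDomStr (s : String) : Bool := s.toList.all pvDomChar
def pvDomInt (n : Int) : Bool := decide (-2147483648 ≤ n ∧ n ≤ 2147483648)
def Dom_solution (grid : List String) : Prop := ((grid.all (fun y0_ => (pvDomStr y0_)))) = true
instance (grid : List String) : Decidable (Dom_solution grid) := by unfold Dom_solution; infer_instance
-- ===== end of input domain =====

-- B replaces A's recursive dfs by an iterative chain-length loop with an accumulator and a
-- modulo-based step helper over one flattened state list (objective: simpler, same cost).

-- ===== PORT A =====
-- the 3D boolean array 'visited' is represented by the list of triples set to True — exact,
-- since every index the Python touches is in range; the .getD fallbacks below are totality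
-- guards reached only outside Pre_solution (where the Python raises).
def nextDirA (grid : List String) (r c d : Int) : Int :=
  let ch := (PySem.Str.pyGet? (PySem.List.pyGetD grid r "") c).getD 'S'
  if ch = 'S' then d
  else if ch = 'L' then PySem.Int.mod (d - 1) 4
  else if ch = 'R' then PySem.Int.mod (d + 1) 4
  else d  -- Python returns None here and then raises; excluded by Pre_solution

-- fuel is a totality guard only: calls from 'solution' pass more fuel than there are states,
-- and each recursive call visits a previously unvisited state.
def dfsA (grid : List String) : Nat → List (Int × Int × Int) → Int → Int → Int → Int × List (Int × Int × Int)
  | 0, v, _, _, _ => (0, v)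
  | fuel + 1, v, r, c, d =>
    let v := (r, c, d) :: v
    let h : Int := (grid.length : Int)
    let w : Int := PySem.Str.len (PySem.List.pyGetD grid 0 "")
    let rc : Int × Int :=
      if d = 0 then (if r - 1 < 0 then h - 1 else r - 1, c)
      else if d = 1 then (r, if c + 1 = w then 0 else c + 1)
      else if d = 2 then (if r + 1 = h then 0 else r + 1, c)
      else if d = 3 then (r, if c - 1 < 0 then w - 1 else c - 1)
      else (r, c)
    let d' := nextDirA grid rc.1 rc.2 d
    if (rc.1, rc.2, d') ∈ v then (1, v)
    else
      let p := dfsA grid fuel v rc.1 rc.2 d'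
      (p.1 + 1, p.2)

def solution (grid : List String) : List Int :=
  let h : Int := (grid.length : Int)
  let w : Int := PySem.Str.len (PySem.List.pyGetD grid 0 "")
  let fuel : Nat := grid.length * ((grid.headD "").toList.length) * 4 + 1
  let res := (PySem.List.pyRange 0 h 1).foldl (fun st r =>
      (PySem.List.pyRange 0 w 1).foldl (fun st c =>
        (PySem.List.pyRange 0 4 1).foldl (fun st d =>
          if (r, c, d) ∈ st.2 then st
          else
            let p := dfsA grid fuel st.2 r c d
            (st.1 ++ [p.1], p.2)) st) st)
    (([] : List Int), ([] : List (Int × Int × Int)))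
  PySem.List.sorted res.1 (fun x => x) false

-- ===== PORT B =====
def stepB (grid : List String) (s : Int × Int × Int) : Int × Int × Int :=
  let h : Int := (grid.length : Int)
  let w : Int := PySem.Str.len (PySem.List.pyGetD grid 0 "")
  let rc : Int × Int :=
    if s.2.2 = 0 then (PySem.Int.mod (s.1 - 1) h, s.2.1)
    else if s.2.2 = 1 then (s.1, PySem.Int.mod (s.2.1 + 1) w)
    else if s.2.2 = 2 then (PySem.Int.mod (s.1 + 1) h, s.2.1)
    else (s.1, PySem.Int.mod (s.2.1 - 1) w)
  let ch := (PySem.Str.pyGet? (PySem.List.pyGetD grid rc.1 "") rc.2).getD 'S'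
  let d := if ch = 'L' then PySem.Int.mod (s.2.2 - 1) 4
           else if ch = 'R' then PySem.Int.mod (s.2.2 + 1) 4
           else s.2.2
  (rc.1, rc.2, d)

-- the 'while True' chain loop: k is the running count; fuel is a totality guard only
def chainB (grid : List String) : Nat → Int → PySem.Set (Int × Int × Int) → (Int × Int × Int) → Int × PySem.Set (Int × Int × Int)
  | 0, k, v, _ => (k, v)
  | fuel + 1, k, v, cur =>
    let v := PySem.Set.add v cur
    let nxt := stepB grid cur
    if nxt ∈ v then (k + 1, v) else chainB grid fuel (k + 1) v nxt

def solution_alt (grid : List String) : List Int :=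
  let h : Int := (grid.length : Int)
  let w : Int := PySem.Str.len (PySem.List.pyGetD grid 0 "")
  let fuel : Nat := grid.length * ((grid.headD "").toList.length) * 4 + 1
  let states : List (Int × Int × Int) :=
    (PySem.List.pyRange 0 h 1).flatMap (fun r =>
      (PySem.List.pyRange 0 w 1).flatMap (fun c =>
        (PySem.List.pyRange 0 4 1).map (fun d => (r, c, d))))
  let res := states.foldl (fun st s =>
      if s ∈ st.1 then st
      else
        let p := chainB grid fuel 0 st.1 s
        (p.2, st.2 ++ [p.1]))
    ((PySem.Set.empty : PySem.Set (Int × Int × Int)), ([] : List Int))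
  PySem.List.sorted res.2 (fun x => x) false

-- ===== PRECONDITION & SPEC =====
-- Pre_ excludes exactly the inputs on which the Python A raises: rows shorter than the first row
-- (IndexError while moving), and grids whose first len(grid[0]) columns contain a character other
-- than S/L/R (next_direction returns None, then a TypeError).
def Pre_solution (grid : List String) : Prop :=
  ∀ s ∈ grid, (grid.headD "").toList.length ≤ s.toList.length ∧
    ∀ i < (grid.headD "").toList.length,
      s.toList.getD i ' ' = 'S' ∨ s.toList.getD i ' ' = 'L' ∨ s.toList.getD i ' ' = 'R'
instance (grid : List String) : Decidable (Pre_solution grid) := by unfold Pre_solution; infer_instance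

def pvWitness_solution : List String := ["SL", "RR"]

def Spec_solution (grid : List String) (out : List Int) : Prop := out = solution_alt grid
instance (grid : List String) (out : List Int) : Decidable (Spec_solution grid out) := by unfold Spec_solution; infer_instance

-- ===== CLAIM (what is proved, stated in full; the proofs are below) =====
def Claim_equal_solution : Prop := ∀ (grid : List String), Dom_solution grid → Pre_solution grid → Spec_solution grid (solution grid)

-- ===== LEMMAS AND PROOFS =====

-- A's move step (the if/elif wraparound chain of dfs), as a named helper for the lemmas
def moveA (grid : List String) (r c d : Int) : Int × Int :=
  let h : Int := (grid.length : Int)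
  let w : Int := PySem.Str.len (PySem.List.pyGetD grid 0 "")
  if d = 0 then (if r - 1 < 0 then h - 1 else r - 1, c)
  else if d = 1 then (r, if c + 1 = w then 0 else c + 1)
  else if d = 2 then (if r + 1 = h then 0 else r + 1, c)
  else if d = 3 then (r, if c - 1 < 0 then w - 1 else c - 1)
  else (r, c)

lemma dfsA_succ (grid : List String) (fuel : Nat) (v : List (Int × Int × Int)) (r c d : Int) :
    dfsA grid (fuel + 1) v r c d =
      (let v' := (r, c, d) :: v
       let rc := moveA grid r c d
       let d' := nextDirA grid rc.1 rc.2 d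
       if (rc.1, rc.2, d') ∈ v' then (1, v')
       else
         let p := dfsA grid fuel v' rc.1 rc.2 d'
         (p.1 + 1, p.2)) := rfl

lemma mod_wrap_sub (x m : Int) (h0 : 0 ≤ x) (hm : x < m) :
    PySem.Int.mod (x - 1) m = if x - 1 < 0 then m - 1 else x - 1 := by
  rw [PySem.Int.mod_eq_emod_of_pos (by omega)]
  split_ifs with h
  · have hx : x = 0 := by omega
    subst hx
    rw [show (0 : Int) - 1 = (m - 1) - m by ring, Int.sub_emod_right]
    exact Int.emod_eq_of_lt (by omega) (by omega)
  · exact Int.emod_eq_of_lt (by omega) (by omega)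

lemma mod_wrap_add (x m : Int) (h0 : 0 ≤ x) (hm : x < m) :
    PySem.Int.mod (x + 1) m = if x + 1 = m then 0 else x + 1 := by
  rw [PySem.Int.mod_eq_emod_of_pos (by omega)]
  split_ifs with h
  · rw [h]; simp
  · exact Int.emod_eq_of_lt (by omega) (by omega)

lemma dir_case (ch : Char) (d : Int) :
    (if ch = 'L' then PySem.Int.mod (d - 1) 4
     else if ch = 'R' then PySem.Int.mod (d + 1) 4 else d) =
    (if ch = 'S' then d
     else if ch = 'L' then PySem.Int.mod (d - 1) 4
     else if ch = 'R' then PySem.Int.mod (d + 1) 4 else d) := by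
  split_ifs <;> simp_all

lemma step_eq (grid : List String) (r c d : Int)
    (hr0 : 0 ≤ r) (hr : r < (grid.length : Int))
    (hc0 : 0 ≤ c) (hc : c < PySem.Str.len (PySem.List.pyGetD grid 0 ""))
    (hd0 : 0 ≤ d) (hd : d < 4) :
    stepB grid (r, c, d) =
      ((moveA grid r c d).1, (moveA grid r c d).2,
        nextDirA grid (moveA grid r c d).1 (moveA grid r c d).2 d) := by
  have hrc : (if d = 0 then (PySem.Int.mod (r - 1) (grid.length : Int), c)
      else if d = 1 then (r, PySem.Int.mod (c + 1) (PySem.Str.len (PySem.List.pyGetD grid 0 "")))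
      else if d = 2 then (PySem.Int.mod (r + 1) (grid.length : Int), c)
      else (r, PySem.Int.mod (c - 1) (PySem.Str.len (PySem.List.pyGetD grid 0 "")))) =
      moveA grid r c d := by
    have h3 : d = 0 ∨ d = 1 ∨ d = 2 ∨ d = 3 := by omega
    rcases h3 with h | h | h | h <;> subst h <;>
      simp [moveA, mod_wrap_sub r _ hr0 hr, mod_wrap_add r _ hr0 hr,
        mod_wrap_sub c ((PySem.List.pyGetD grid 0 "").length : Int) hc0 (by simpa using hc),
        mod_wrap_add c ((PySem.List.pyGetD grid 0 "").length : Int) hc0 (by simpa using hc)]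
  simp only [stepB, nextDirA, hrc]
  conv_lhs => rw [dir_case]

lemma nextDir_range (grid : List String) (r c d : Int) (hd0 : 0 ≤ d) (hd : d < 4) :
    0 ≤ nextDirA grid r c d ∧ nextDirA grid r c d < 4 := by
  simp only [nextDirA]
  split_ifs <;>
    first
      | exact ⟨hd0, hd⟩
      | exact ⟨PySem.Int.mod_nonneg _ (by omega), PySem.Int.mod_lt _ (by omega)⟩

lemma moveA_range (grid : List String) (r c d : Int)
    (hr0 : 0 ≤ r) (hr : r < (grid.length : Int))
    (hc0 : 0 ≤ c) (hc : c < PySem.Str.len (PySem.List.pyGetD grid 0 "")) :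
    0 ≤ (moveA grid r c d).1 ∧ (moveA grid r c d).1 < (grid.length : Int) ∧
    0 ≤ (moveA grid r c d).2 ∧ (moveA grid r c d).2 < PySem.Str.len (PySem.List.pyGetD grid 0 "") := by
  simp at hc
  unfold moveA
  split_ifs <;> simp <;> omega

lemma mem_set_add {α : Type} [BEq α] [LawfulBEq α] (x y : α) (s : PySem.Set α) :
    x ∈ PySem.Set.add s y ↔ x = y ∨ x ∈ s := by
  simp [PySem.Set.add]
  split_ifs with h
  · simp at h
    constructor
    · exact Or.inr
    · rintro (rfl | hx) <;> [exact h; exact hx]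
  · simp [or_comm]

lemma chain_eq (grid : List String) :
    ∀ (fuel : Nat) (vA : List (Int × Int × Int)) (vB : PySem.Set (Int × Int × Int)) (k r c d : Int),
    (∀ x, x ∈ vA ↔ x ∈ vB) →
    0 ≤ r → r < (grid.length : Int) →
    0 ≤ c → c < PySem.Str.len (PySem.List.pyGetD grid 0 "") →
    0 ≤ d → d < 4 →
    (chainB grid fuel k vB (r, c, d)).1 = k + (dfsA grid fuel vA r c d).1 ∧
    (∀ x, x ∈ (chainB grid fuel k vB (r, c, d)).2 ↔ x ∈ (dfsA grid fuel vA r c d).2) := by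
  intro fuel
  induction fuel with
  | zero =>
    intro vA vB k r c d hv _ _ _ _ _ _
    refine ⟨by simp [chainB, dfsA], fun x => ?_⟩
    simp only [chainB, dfsA]
    exact (hv x).symm
  | succ fuel ih =>
    intro vA vB k r c d hv hr0 hr hc0 hc hd0 hd
    rw [dfsA_succ]
    simp only [chainB, step_eq grid r c d hr0 hr hc0 hc hd0 hd]
    have hv' : ∀ x, x ∈ (r, c, d) :: vA ↔ x ∈ PySem.Set.add vB (r, c, d) := by
      intro x; rw [mem_set_add]; simp [hv x]
    set rc := moveA grid r c d with hrc
    set d' := nextDirA grid rc.1 rc.2 d with hd'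
    by_cases hmem : (rc.1, rc.2, d') ∈ (r, c, d) :: vA
    · rw [if_pos ((hv' _).mp hmem), if_pos hmem]
      exact ⟨by ring, fun x => (hv' x).symm⟩
    · rw [if_neg (fun hx => hmem ((hv' _).mpr hx)), if_neg hmem]
      obtain ⟨hm1, hm2, hm3, hm4⟩ := moveA_range grid r c d hr0 hr hc0 hc
      obtain ⟨hn1, hn2⟩ := nextDir_range grid rc.1 rc.2 d hd0 hd
      obtain ⟨e1, e2⟩ := ih ((r, c, d) :: vA) (PySem.Set.add vB (r, c, d)) (k + 1)
        rc.1 rc.2 d' hv' hm1 hm2 hm3 hm4 hn1 hn2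
      exact ⟨by rw [e1]; ring, e2⟩

lemma outer_eq (grid : List String) (fuel : Nat) :
    ∀ (states : List (Int × Int × Int)),
    (∀ s ∈ states, 0 ≤ s.1 ∧ s.1 < (grid.length : Int) ∧ 0 ≤ s.2.1 ∧
      s.2.1 < PySem.Str.len (PySem.List.pyGetD grid 0 "") ∧ 0 ≤ s.2.2 ∧ s.2.2 < 4) →
    ∀ (ret : List Int) (vA : List (Int × Int × Int)) (vB : PySem.Set (Int × Int × Int)),
    (∀ x, x ∈ vA ↔ x ∈ vB) →
    (states.foldl (fun st s => if s ∈ st.2 then st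
        else (st.1 ++ [(dfsA grid fuel st.2 s.1 s.2.1 s.2.2).1], (dfsA grid fuel st.2 s.1 s.2.1 s.2.2).2))
        (ret, vA)).1
      = (states.foldl (fun st s => if s ∈ st.1 then st
        else ((chainB grid fuel 0 st.1 s).2, st.2 ++ [(chainB grid fuel 0 st.1 s).1])) (vB, ret)).2 := by
  intro states
  induction states with
  | nil => intro _ ret vA vB hv; rfl
  | cons s t ihs =>
    intro hst ret vA vB hv
    obtain ⟨r, c, d⟩ := s
    obtain ⟨h1, h2, h3, h4, h5, h6⟩ := hst (r, c, d) (by simp)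
    have ht : ∀ s ∈ t, 0 ≤ s.1 ∧ s.1 < (grid.length : Int) ∧ 0 ≤ s.2.1 ∧
        s.2.1 < PySem.Str.len (PySem.List.pyGetD grid 0 "") ∧ 0 ≤ s.2.2 ∧ s.2.2 < 4 :=
      fun x hx => hst x (List.mem_cons_of_mem _ hx)
    simp only [List.foldl_cons]
    by_cases hmem : (r, c, d) ∈ vA
    · rw [if_pos hmem, if_pos ((hv (r, c, d)).mp hmem)]
      exact ihs ht ret vA vB hv
    · have hmB : (r, c, d) ∉ vB := fun hx => hmem ((hv (r, c, d)).mpr hx)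
      rw [if_neg hmem, if_neg hmB]
      obtain ⟨e1, e2⟩ := chain_eq grid fuel vA vB 0 r c d hv h1 h2 h3 h4 h5 h6
      rw [show (chainB grid fuel 0 vB (r, c, d)).1 = (dfsA grid fuel vA r c d).1 from by simpa using e1]
      exact ihs ht _ _ _ (fun x => (e2 x).symm)

lemma foldl_flatMap' {α β σ : Type} (xs : List α) (g : α → List β) (f : σ → β → σ) (init : σ) :
    (xs.flatMap g).foldl f init = xs.foldl (fun st x => (g x).foldl f st) init := by
  induction xs generalizing init with
  | nil => rfl
  | cons a t ih => simp [List.foldl_append, ih]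


lemma A_flatten (grid : List String) (hI wI : Int) (fuel : Nat)
    (init : List Int × List (Int × Int × Int)) :
    (PySem.List.pyRange 0 hI 1).foldl (fun st r =>
      (PySem.List.pyRange 0 wI 1).foldl (fun st c =>
        (PySem.List.pyRange 0 4 1).foldl (fun st d =>
          if (r, c, d) ∈ st.2 then st
          else (st.1 ++ [(dfsA grid fuel st.2 r c d).1], (dfsA grid fuel st.2 r c d).2)) st) st) init
  = ((PySem.List.pyRange 0 hI 1).flatMap (fun r =>
      (PySem.List.pyRange 0 wI 1).flatMap (fun c =>
        (PySem.List.pyRange 0 4 1).map (fun d => (r, c, d))))).foldl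
      (fun st s => if s ∈ st.2 then st
        else (st.1 ++ [(dfsA grid fuel st.2 s.1 s.2.1 s.2.2).1], (dfsA grid fuel st.2 s.1 s.2.1 s.2.2).2)) init := by
  simp only [foldl_flatMap', List.foldl_map]

lemma states_range (hN wN : Nat) :
    ∀ s ∈ (PySem.List.pyRange 0 (hN : Int) 1).flatMap (fun r =>
      (PySem.List.pyRange 0 (wN : Int) 1).flatMap (fun c =>
        (PySem.List.pyRange 0 4 1).map (fun d => (r, c, d)))),
      0 ≤ s.1 ∧ s.1 < (hN : Int) ∧ 0 ≤ s.2.1 ∧ s.2.1 < (wN : Int) ∧ 0 ≤ s.2.2 ∧ s.2.2 < 4 := by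
  intro s hs
  simp only [List.mem_flatMap, List.mem_map, PySem.List.mem_pyRange_one] at hs
  obtain ⟨r, hr, c, hc, d, hd, rfl⟩ := hs
  simp
  omega

-- ===== VERDICT (by name: the statement is the Claim_ definition above) =====
theorem solution_spec : Claim_equal_solution := by
  intro grid _ _
  unfold Spec_solution solution solution_alt
  dsimp only
  have hw : PySem.Str.len (PySem.List.pyGetD grid 0 "") = (((grid.headD "").toList.length : Int)) := by
    cases grid <;> simp [PySem.List.pyGetD_zero]
  rw [hw, A_flatten]
  refine congrArg (fun l => PySem.List.sorted l (fun x => x) false) ?_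
  refine outer_eq grid _ _ ?_ [] [] PySem.Set.empty (by simp [PySem.Set.empty])
  intro s hs
  have := states_range grid.length ((grid.headD "").toList.length) s hs
  have hpg : PySem.List.pyGetD grid 0 "" = grid.headD "" := by
    cases grid <;> simp [PySem.List.pyGetD_zero]
  simpa [hw, hpg] using this
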